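-- pv_equiv track=rewrite | github.com/pritam-raskar/sqaid-chatbot-v2 | chatbot-system/backend/app/prompts/visualization_prompt.py | _extract_all_json_blocks
-- ===== SOURCE A (Python) =====
-- def _extract_all_json_blocks(response: str) -> list[str]:
--     """
--     Extract all JSON blocks from response.
--
--     Args:
--         response: LLM response string
--
--     Returns:
--         List of JSON strings
--     """
--     json_blocks = []
--     pos = 0
--
--     while pos < len(response):
--         # Find next opening brace
--         start_idx = response.find('{', pos)
--         if start_idx == -1:
--             break
--
--         # Find matching closing brace
--         brace_count = 0
--         end_idx = start_idx
--
--         for i in range(start_idx, len(response)):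
--             if response[i] == '{':
--                 brace_count += 1
--             elif response[i] == '}':
--                 brace_count -= 1
--                 if brace_count == 0:
--                     end_idx = i
--                     break
--
--         if brace_count == 0:
--             json_str = response[start_idx:end_idx + 1]
--             json_blocks.append(json_str)
--             pos = end_idx + 1
--         else:
--             # No matching closing brace found
--             break
--
--     return json_blocks
-- ===== SOURCE B (Python) =====
-- def _extract_all_json_blocks(response: str) -> list[str]:
--     """Single pass with a depth counter; no rescanning or index arithmetic."""
--     blocks = []
--     depth = 0
--     cur = []
--     for ch in response:
--         if ch == '{':
--             depth += 1
--             cur.append(ch)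
--         elif ch == '}' and depth > 0:
--             depth -= 1
--             cur.append(ch)
--             if depth == 0:
--                 blocks.append(''.join(cur))
--                 cur = []
--         elif depth > 0:
--             cur.append(ch)
--     return blocks
-- ===== Notes on version B (the rewrite author's own statement) =====
-- stated objective: simpler
-- what changed: Replaces the while-loop of find-next-opening-brace plus an inner rescan from that position with a single left-to-right pass keeping a depth counter and a current-block character accumulator.
import Mathlib
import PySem

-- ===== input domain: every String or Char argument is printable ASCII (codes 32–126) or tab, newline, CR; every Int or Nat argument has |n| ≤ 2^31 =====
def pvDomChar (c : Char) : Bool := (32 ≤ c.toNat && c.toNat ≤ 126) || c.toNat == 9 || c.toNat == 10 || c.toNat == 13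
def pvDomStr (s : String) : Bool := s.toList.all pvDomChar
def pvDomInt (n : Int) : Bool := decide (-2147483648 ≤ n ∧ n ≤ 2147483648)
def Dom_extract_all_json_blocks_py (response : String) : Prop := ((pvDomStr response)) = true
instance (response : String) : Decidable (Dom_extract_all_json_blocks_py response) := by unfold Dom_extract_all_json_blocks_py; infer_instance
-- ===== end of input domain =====

-- B replaces A's find-then-rescan while-loop by a single left-to-right pass with a
-- depth counter and current-block accumulator (objective: simpler, one pass).


-- ===== PORT A =====
-- `response.find('{', pos)`: returns the suffix starting at the first '{' (A only
-- ever uses the index to slice/scan from there, so the suffix carries the same data).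
def pvAFind : List Char → Option (List Char)
  | [] => none
  | c :: rest => if c = '{' then some (c :: rest) else pvAFind rest

-- A's inner `for i in range(start_idx, len(response))` brace-counting loop, as the
-- obvious structural recursion over the same characters; `acc` is the slice
-- response[start_idx:i] built up so that `some (acc++[c], rest)` is
-- (response[start_idx:end_idx+1], the remainder after end_idx).
def pvAScan : List Char → Int → List Char → Option (List Char × List Char)
  | [], _, _ => none
  | c :: rest, count, acc =>
    if c = '{' then pvAScan rest (count + 1) (acc ++ [c])
    else if c = '}' then
      if count - 1 = 0 then some (acc ++ [c], rest)
      else pvAScan rest (count - 1) (acc ++ [c])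
    else pvAScan rest count (acc ++ [c])

theorem pvAFind_length {cs cs' : List Char} (h : pvAFind cs = some cs') :
    cs'.length ≤ cs.length := by
  induction cs with
  | nil => simp [pvAFind] at h
  | cons c rest ih =>
    simp only [pvAFind] at h
    split at h
    · cases h; simp
    · have := ih h; simp; omega

theorem pvAScan_length {cs rest fin : List Char} {count : Int} {acc : List Char}
    (h : pvAScan cs count acc = some (fin, rest)) : rest.length < cs.length := by
  induction cs generalizing count acc with
  | nil => simp [pvAScan] at h
  | cons c tl ih =>
    simp only [pvAScan] at h
    split at h
    · have := ih h; simp; omega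
    · split at h
      · split at h
        · cases h; simp
        · have := ih h; simp; omega
      · have := ih h; simp; omega

-- A's outer `while pos < len(response)` loop over the remaining suffix.
def pvALoop (cs : List Char) (blocks : List String) : List String :=
  match h : pvAFind cs with
  | none => blocks
  | some cs' =>
    match h2 : pvAScan cs' 0 [] with
    | none => blocks
    | some (fin, rest) => pvALoop rest (blocks ++ [String.mk fin])
termination_by cs.length
decreasing_by
  have h1 := pvAFind_length h
  have h3 := pvAScan_length h2
  omega

def extract_all_json_blocks_py (response : String) : List String :=
  pvALoop response.toList []

-- ===== PORT B =====
-- one iteration of Source B's `for ch in response` body over state (depth, cur, blocks)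
def pvBStep (st : Int × List Char × List String) (ch : Char) :
    Int × List Char × List String :=
  let (depth, cur, blocks) := st
  if ch = '{' then (depth + 1, cur ++ [ch], blocks)
  else if ch = '}' ∧ 0 < depth then
    if depth - 1 = 0 then (0, [], blocks ++ [String.mk (cur ++ [ch])])
    else (depth - 1, cur ++ [ch], blocks)
  else if 0 < depth then (depth, cur ++ [ch], blocks)
  else st

def extract_all_json_blocks_py_alt (response : String) : List String :=
  (response.toList.foldl pvBStep (0, [], [])).2.2

-- ===== PRECONDITION & SPEC =====
def Spec_extract_all_json_blocks_py (response : String) (out : List String) : Prop := out = extract_all_json_blocks_py_alt response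
instance (response : String) (out : List String) : Decidable (Spec_extract_all_json_blocks_py response out) := by unfold Spec_extract_all_json_blocks_py; infer_instance

-- ===== CLAIM (what is proved, stated in full; the proofs are below) =====
def Claim_equal_extract_all_json_blocks_py : Prop := ∀ (response : String), Dom_extract_all_json_blocks_py response → Spec_extract_all_json_blocks_py response (extract_all_json_blocks_py response)

-- ===== LEMMAS AND PROOFS =====

-- at depth 0, characters other than '{' leave B's state unchanged
theorem pvB_skip {pre : List Char} (hpre : '{' ∉ pre) (cur : List Char)
    (blocks : List String) :
    List.foldl pvBStep (0, cur, blocks) pre = (0, cur, blocks) := by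
  induction pre with
  | nil => rfl
  | cons c tl ih =>
    have hc : c ≠ '{' := fun h => hpre (h ▸ List.mem_cons_self)
    have htl : '{' ∉ tl := fun h => hpre (List.mem_cons_of_mem _ h)
    simp [pvBStep, hc]
    exact ih htl

theorem pvAFind_none {cs : List Char} (h : pvAFind cs = none) : '{' ∉ cs := by
  induction cs with
  | nil => simp
  | cons c tl ih =>
    simp only [pvAFind] at h
    split at h
    · exact absurd h (by simp)
    · intro hm
      rcases List.mem_cons.mp hm with h1 | h2
      · exact ‹¬ c = '{'› h1.symm
      · exact ih h h2

theorem pvAFind_some {cs cs' : List Char} (h : pvAFind cs = some cs') :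
    ∃ pre tail, cs = pre ++ cs' ∧ '{' ∉ pre ∧ cs' = '{' :: tail := by
  induction cs with
  | nil => simp [pvAFind] at h
  | cons c tl ih =>
    simp only [pvAFind] at h
    split at h
    · cases h
      exact ⟨[], tl, by simp, by simp, by simp_all⟩
    · obtain ⟨pre, tail, h1, h2, h3⟩ := ih h
      exact ⟨c :: pre, tail, by simp [h1], by
        intro hm
        rcases List.mem_cons.mp hm with ha | hb
        · exact ‹¬ c = '{'› ha.symm
        · exact h2 hb, h3⟩

-- while scanning inside a block (depth ≥ 1), A's inner loop and B's fold advance in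
-- lock-step: a successful scan closes the block and resets B's state …
theorem pvScan_fold {cs : List Char} {count : Int} {acc fin rest : List Char}
    (blocks : List String) (hc : 1 ≤ count)
    (h : pvAScan cs count acc = some (fin, rest)) :
    List.foldl pvBStep (count, acc, blocks) cs
      = List.foldl pvBStep (0, [], blocks ++ [String.mk fin]) rest := by
  induction cs generalizing count acc with
  | nil => simp [pvAScan] at h
  | cons c tl ih =>
    simp only [pvAScan] at h
    by_cases h1 : c = '{'
    · subst h1
      rw [if_pos rfl] at h
      simp only [List.foldl_cons, pvBStep, if_pos]
      exact ih (by omega) h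
    · rw [if_neg h1] at h
      by_cases h2 : c = '}'
      · rw [if_pos h2] at h
        simp only [List.foldl_cons, pvBStep, if_neg h1,
          if_pos (⟨h2, by omega⟩ : c = '}' ∧ 0 < count)]
        by_cases h3 : count - 1 = 0
        · rw [if_pos h3] at h
          cases h
          rw [if_pos h3]
        · rw [if_neg h3] at h
          rw [if_neg h3]
          exact ih (by omega) h
      · rw [if_neg h2] at h
        simp only [List.foldl_cons, pvBStep, if_neg h1,
          if_neg (by simp [h2] : ¬ (c = '}' ∧ 0 < count)), if_pos (by omega : (0:Int) < count)]
        exact ih (by omega) h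

-- … and a failed scan (unterminated block) means the rest of the pass emits nothing.
theorem pvScan_none {cs : List Char} {count : Int} {acc : List Char}
    (blocks : List String) (hc : 1 ≤ count)
    (h : pvAScan cs count acc = none) :
    (List.foldl pvBStep (count, acc, blocks) cs).2.2 = blocks := by
  induction cs generalizing count acc with
  | nil => simp at h ⊢
  | cons c tl ih =>
    simp only [pvAScan] at h
    by_cases h1 : c = '{'
    · subst h1
      rw [if_pos rfl] at h
      simp only [List.foldl_cons, pvBStep, if_pos]
      exact ih (by omega) h
    · rw [if_neg h1] at h
      by_cases h2 : c = '}'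
      · rw [if_pos h2] at h
        by_cases h3 : count - 1 = 0
        · rw [if_pos h3] at h; cases h
        · rw [if_neg h3] at h
          simp only [List.foldl_cons, pvBStep, if_neg h1,
            if_pos (⟨h2, by omega⟩ : c = '}' ∧ 0 < count), if_neg h3]
          exact ih (by omega) h
      · rw [if_neg h2] at h
        simp only [List.foldl_cons, pvBStep, if_neg h1,
          if_neg (by simp [h2] : ¬ (c = '}' ∧ 0 < count)), if_pos (by omega : (0:Int) < count)]
        exact ih (by omega) h

theorem pvMain (cs : List Char) (blocks : List String) :
    pvALoop cs blocks = (List.foldl pvBStep (0, [], blocks) cs).2.2 := by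
  induction cs, blocks using pvALoop.induct with
  | case1 cs blocks hfind =>
    rw [pvALoop, hfind, pvB_skip (pvAFind_none hfind)]
  | case3 cs blocks cs' hfind fin rest hscan ih =>
    rw [pvALoop, hfind]
    obtain ⟨pre, tail, hsplit, hpre, htail⟩ := pvAFind_some hfind
    subst hsplit; subst htail
    rw [List.foldl_append, pvB_skip hpre]
    have hstep : List.foldl pvBStep (0, [], blocks) ('{' :: tail)
        = List.foldl pvBStep (1, ['{'], blocks) tail := by
      simp [pvBStep]
    have hscan' : pvAScan tail 1 ['{'] = some (fin, rest) := by
      simpa [pvAScan] using hscan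
    rw [hstep, pvScan_fold blocks (by omega) hscan', ← ih]
    split
    · rename_i hEq; simp at hEq
    · rename_i cs'' hEq
      obtain rfl : '{' :: tail = cs'' := by injection hEq
      split
      · rename_i h2; rw [hscan] at h2; simp at h2
      · rename_i fin' rest' h2
        rw [hscan] at h2
        simp only [Option.some.injEq, Prod.mk.injEq] at h2
        obtain ⟨rfl, rfl⟩ := h2
        rfl
  | case2 cs blocks cs' hfind hscan =>
    rw [pvALoop, hfind]
    obtain ⟨pre, tail, hsplit, hpre, htail⟩ := pvAFind_some hfind
    subst hsplit; subst htail
    rw [List.foldl_append, pvB_skip hpre]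
    have hstep : List.foldl pvBStep (0, [], blocks) ('{' :: tail)
        = List.foldl pvBStep (1, ['{'], blocks) tail := by
      simp [pvBStep]
    have hscan' : pvAScan tail 1 ['{'] = none := by
      simpa [pvAScan] using hscan
    rw [hstep, pvScan_none blocks (by omega) hscan']
    split
    · rename_i hEq; simp at hEq
    · rename_i cs'' hEq
      obtain rfl : '{' :: tail = cs'' := by injection hEq
      split
      · rfl
      · rename_i fin' rest' h2; rw [hscan] at h2; simp at h2

-- ===== VERDICT (by name: the statement is the Claim_ definition above) =====
theorem extract_all_json_blocks_py_spec : Claim_equal_extract_all_json_blocks_py := by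
  intro response _
  unfold Spec_extract_all_json_blocks_py extract_all_json_blocks_py extract_all_json_blocks_py_alt
  exact pvMain response.toList []
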